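-- pv_equiv track=rewrite | github.com/Shoefarts/sandalfarts | packages/utils.py | terrresandem
-- ===== SOURCE A (Python) =====
-- def terrresandem(terrResource:list, terrEmerald):
--     ore = 0
--     crops = 0
--     fish = 0
--     wood = 0
--     for res in terrResource:
--         if res == 'ore':
--             ore += 3600
--         elif res == 'crops':
--             crops += 3600
--         elif res == 'fish':
--             fish += 3600
--         elif res == 'wood':
--             wood += 3600
--         elif res == 'oasis':
--             ore += 900
--             crops += 900
--             fish += 900
--             wood += 900
--     emerald = 0
--     if terrEmerald == 'normal':
--         emerald += 9000
--     elif terrEmerald == 'town':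
--         emerald += 18000
--     elif terrEmerald == 'oasis':
--         emerald += 1800
--     return([ore, crops, fish, wood, emerald])
-- ===== SOURCE B (Python) =====
-- def terrresandem(terrResource: list, terrEmerald):
--     oasis = 900 * terrResource.count('oasis')
--     ore = 3600 * terrResource.count('ore') + oasis
--     crops = 3600 * terrResource.count('crops') + oasis
--     fish = 3600 * terrResource.count('fish') + oasis
--     wood = 3600 * terrResource.count('wood') + oasis
--     emerald = {'normal': 9000, 'town': 18000, 'oasis': 1800}.get(terrEmerald, 0)
--     return [ore, crops, fish, wood, emerald]
-- ===== Notes on version B (the rewrite author's own statement) =====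
-- stated objective: idiomatic
-- what changed: Replaced the per-element if/elif accumulation loop over four mutable totals with closed-form arithmetic from list.count of each resource (plus the oasis bonus) and a dict lookup for the emerald value.
import Mathlib
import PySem

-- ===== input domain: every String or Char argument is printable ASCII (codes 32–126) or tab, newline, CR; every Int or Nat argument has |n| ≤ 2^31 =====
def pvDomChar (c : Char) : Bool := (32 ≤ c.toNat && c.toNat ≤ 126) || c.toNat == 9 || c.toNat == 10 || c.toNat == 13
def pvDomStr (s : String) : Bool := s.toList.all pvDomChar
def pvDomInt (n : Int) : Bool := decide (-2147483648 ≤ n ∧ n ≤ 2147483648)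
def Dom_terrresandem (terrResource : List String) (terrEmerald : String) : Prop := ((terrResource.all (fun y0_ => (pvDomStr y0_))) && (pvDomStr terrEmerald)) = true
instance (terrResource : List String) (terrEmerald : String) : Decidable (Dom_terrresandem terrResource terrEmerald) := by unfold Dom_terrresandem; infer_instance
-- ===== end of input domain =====

-- ===== PORT A =====
-- B replaces A's per-element if/elif accumulation with closed-form list.count arithmetic and a dict lookup (idiomatic decomposition; same cost).
def pvStepA (s : Int × Int × Int × Int) (res : String) : Int × Int × Int × Int :=
  if res == "ore" then (s.1 + 3600, s.2.1, s.2.2.1, s.2.2.2)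
  else if res == "crops" then (s.1, s.2.1 + 3600, s.2.2.1, s.2.2.2)
  else if res == "fish" then (s.1, s.2.1, s.2.2.1 + 3600, s.2.2.2)
  else if res == "wood" then (s.1, s.2.1, s.2.2.1, s.2.2.2 + 3600)
  else if res == "oasis" then (s.1 + 900, s.2.1 + 900, s.2.2.1 + 900, s.2.2.2 + 900)
  else s

def terrresandem (terrResource : List String) (terrEmerald : String) : List Int :=
  let s := terrResource.foldl pvStepA (0, 0, 0, 0)
  let emerald : Int :=
    if terrEmerald == "normal" then 0 + 9000
    else if terrEmerald == "town" then 0 + 18000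
    else if terrEmerald == "oasis" then 0 + 1800
    else 0
  [s.1, s.2.1, s.2.2.1, s.2.2.2, emerald]

-- ===== PORT B =====
def terrresandem_alt (terrResource : List String) (terrEmerald : String) : List Int :=
  let oasis : Int := 900 * PySem.List.count terrResource "oasis"
  let ore : Int := 3600 * PySem.List.count terrResource "ore" + oasis
  let crops : Int := 3600 * PySem.List.count terrResource "crops" + oasis
  let fish : Int := 3600 * PySem.List.count terrResource "fish" + oasis
  let wood : Int := 3600 * PySem.List.count terrResource "wood" + oasis
  let emerald : Int := (PySem.Dict.ofList [("normal", (9000 : Int)), ("town", 18000), ("oasis", 1800)]).getD terrEmerald 0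
  [ore, crops, fish, wood, emerald]

-- ===== PRECONDITION & SPEC =====
def Spec_terrresandem (terrResource : List String) (terrEmerald : String) (out : List Int) : Prop := out = terrresandem_alt terrResource terrEmerald
instance (terrResource : List String) (terrEmerald : String) (out : List Int) : Decidable (Spec_terrresandem terrResource terrEmerald out) := by unfold Spec_terrresandem; infer_instance

-- ===== CLAIM =====
def Claim_equal_terrresandem : Prop := ∀ (terrResource : List String) (terrEmerald : String), Dom_terrresandem terrResource terrEmerald → Spec_terrresandem terrResource terrEmerald (terrresandem terrResource terrEmerald)

-- ===== LEMMAS AND PROOFS =====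
theorem foldl_stepA (l : List String) (o c f w : Int) :
    l.foldl pvStepA (o, c, f, w) =
      (o + 3600 * l.count "ore" + 900 * l.count "oasis",
       c + 3600 * l.count "crops" + 900 * l.count "oasis",
       f + 3600 * l.count "fish" + 900 * l.count "oasis",
       w + 3600 * l.count "wood" + 900 * l.count "oasis") := by
  induction l generalizing o c f w with
  | nil => simp
  | cons x xs ih =>
    simp only [List.foldl_cons, pvStepA, List.count_cons]
    by_cases h1 : x = "ore" <;> by_cases h2 : x = "crops" <;> by_cases h3 : x = "fish" <;>
      by_cases h4 : x = "wood" <;> by_cases h5 : x = "oasis" <;>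
      simp_all [Prod.ext_iff] <;> omega

theorem emeraldA_eq (e : String) :
    (PySem.Dict.ofList [("normal", (9000 : Int)), ("town", 18000), ("oasis", 1800)]).getD e 0 =
    (if e == "normal" then (0 : Int) + 9000
     else if e == "town" then 0 + 18000
     else if e == "oasis" then 0 + 1800
     else 0) := by
  simp [PySem.Dict.getD, PySem.Dict.get?_mk_cons,
    show PySem.Dict.ofList [("normal", (9000 : Int)), ("town", 18000), ("oasis", 1800)]
       = PySem.Dict.mk [("normal", 9000), ("town", 18000), ("oasis", 1800)] from by decide]
  by_cases h1 : e = "normal" <;> by_cases h2 : e = "town" <;> by_cases h3 : e = "oasis" <;>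
    simp_all [PySem.Dict.get?, eq_comm]

-- ===== VERDICT =====
theorem terrresandem_spec : Claim_equal_terrresandem := by
  intro l e _
  unfold Spec_terrresandem terrresandem terrresandem_alt
  simp only [foldl_stepA, emeraldA_eq, PySem.List.count_eq]
  norm_num [Int.add_comm, Int.mul_comm]
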